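-- pv_equiv track=rewrite | github.com/MDKAM/research-pdf-rag-chatbot | src/ragpdf/eval.py | pages_hit_expected
-- ===== SOURCE A (Python) =====
-- from typing import Any, Dict, List, Optional, Tuple
--
-- def pages_hit_expected(
--     retrieved_pages: List[Tuple[str, int, int]],
--     expected_pages: List[int],
-- ) -> Optional[bool]:
--     """
--     If expected_pages is empty, return None (not applicable).
--     Otherwise return True if any retrieved range overlaps any expected page.
--     """
--     if not expected_pages:
--         return None
--     exp = set(expected_pages)
--     for _, p1, p2 in retrieved_pages:
--         for p in range(p1, p2 + 1):
--             if p in exp: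
--                 return True
--     return False
-- ===== SOURCE B (Python) =====
-- def pages_hit_expected(retrieved_pages, expected_pages):
--     """
--     If expected_pages is empty, return None (not applicable).
--     Otherwise return True if any retrieved range overlaps any expected page.
--     Sort the (deduplicated) expected pages once; for each range, binary-search
--     the first expected page >= p1 and check whether it is <= p2.
--     """
--     if not expected_pages:
--         return None
--     exp = sorted(set(expected_pages))
--     n = len(exp)
--     for _, p1, p2 in retrieved_pages:
--         lo, hi = 0, n
--         while lo < hi:
--             mid = (lo + hi) // 2
--             if exp[mid] < p1:
--                 lo = mid + 1
--             else:
--                 hi = mid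
--         if lo < n and exp[lo] <= p2:
--             return True
--     return False
-- ===== Notes on version B (the rewrite author's own statement) =====
-- stated objective: alternative
-- what changed: Instead of enumerating every page of every retrieved range and testing membership in a set, B sorts the distinct expected pages once and, per range, binary-searches the first expected page >= p1 and compares it with p2; correct because a range [p1,p2] contains an expected page iff the smallest expected page >= p1 is <= p2. Cost no longer depends on range widths, but the pure-Python binary search was not measurably faster than A on the timing inputs.
import Mathlib
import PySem

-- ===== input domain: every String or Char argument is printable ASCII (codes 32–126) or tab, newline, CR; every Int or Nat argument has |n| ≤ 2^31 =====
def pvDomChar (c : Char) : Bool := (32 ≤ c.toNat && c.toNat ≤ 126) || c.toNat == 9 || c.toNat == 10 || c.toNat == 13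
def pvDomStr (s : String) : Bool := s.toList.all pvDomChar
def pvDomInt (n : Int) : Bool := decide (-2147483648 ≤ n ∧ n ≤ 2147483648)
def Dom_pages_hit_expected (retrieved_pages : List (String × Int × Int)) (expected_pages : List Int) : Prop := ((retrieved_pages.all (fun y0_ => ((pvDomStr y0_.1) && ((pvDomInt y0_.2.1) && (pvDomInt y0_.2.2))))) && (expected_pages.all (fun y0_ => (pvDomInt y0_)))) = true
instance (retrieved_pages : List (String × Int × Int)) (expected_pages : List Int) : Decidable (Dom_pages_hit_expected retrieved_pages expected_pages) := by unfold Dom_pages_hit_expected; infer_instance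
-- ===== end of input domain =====

-- B sorts the distinct expected pages once and binary-searches each range's lower endpoint
-- instead of enumerating every page of every range (objective: alternative algorithm).

-- ===== PORT A =====
def pages_hit_expected (retrieved_pages : List (String × Int × Int)) (expected_pages : List Int) : Option Bool :=
  if expected_pages = [] then none
  else
    let exp : PySem.Set Int := PySem.Set.ofList expected_pages
    some (retrieved_pages.any (fun t =>
      (PySem.List.pyRange t.2.1 (t.2.2 + 1) 1).any (fun p => PySem.Set.contains exp p)))

-- ===== PORT B =====
-- the hand-written binary search of Source B: first index in [lo, hi) with exp[i] >= target.
-- fuel = hi - lo bounds the number of loop iterations (structural recursion; fuel only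
-- makes the while-loop total, the computation is the Python's).
def pvBisectGEAux (exp : List Int) (target : Int) : Nat → Nat → Nat → Nat
  | 0, lo, _hi => lo
  | fuel + 1, lo, hi =>
    if lo < hi then
      let mid := (lo + hi) / 2
      if exp.getD mid 0 < target then pvBisectGEAux exp target fuel (mid + 1) hi
      else pvBisectGEAux exp target fuel lo mid
    else lo

def pvBisectGE (exp : List Int) (target : Int) (lo hi : Nat) : Nat :=
  pvBisectGEAux exp target (hi - lo) lo hi

-- Source B's for-loop with early return, as structural recursion
def pvHitLoop (exp : List Int) : List (String × Int × Int) → Bool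
  | [] => false
  | t :: rest =>
    let lo := pvBisectGE exp t.2.1 0 exp.length
    if lo < exp.length && decide (exp.getD lo 0 ≤ t.2.2) then true
    else pvHitLoop exp rest

def pages_hit_expected_alt (retrieved_pages : List (String × Int × Int)) (expected_pages : List Int) : Option Bool :=
  if expected_pages = [] then none
  else
    let exp := PySem.List.sorted (PySem.Set.ofList expected_pages) (fun x => x) false
    some (pvHitLoop exp retrieved_pages)

-- ===== PRECONDITION & SPEC =====
def Spec_pages_hit_expected (retrieved_pages : List (String × Int × Int)) (expected_pages : List Int) (out : Option Bool) : Prop := out = pages_hit_expected_alt retrieved_pages expected_pages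
instance (retrieved_pages : List (String × Int × Int)) (expected_pages : List Int) (out : Option Bool) : Decidable (Spec_pages_hit_expected retrieved_pages expected_pages out) := by unfold Spec_pages_hit_expected; infer_instance

-- ===== CLAIM (what is proved, stated in full; the proofs are below) =====
def Claim_equal_pages_hit_expected : Prop := ∀ (retrieved_pages : List (String × Int × Int)) (expected_pages : List Int), Dom_pages_hit_expected retrieved_pages expected_pages → Spec_pages_hit_expected retrieved_pages expected_pages (pages_hit_expected retrieved_pages expected_pages)

-- ===== LEMMAS AND PROOFS =====

-- binary-search invariant: the result r is ≤ length, everything below r is < target,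
-- and (for a sorted list) exp[r] ≥ target when r < length.
theorem pvBisectGEAux_spec (exp : List Int) (t : Int)
    (hsort : exp.Pairwise (· ≤ ·)) :
    ∀ fuel lo hi, hi - lo ≤ fuel → lo ≤ hi → hi ≤ exp.length →
    (∀ i, i < lo → exp.getD i 0 < t) →
    (∀ i, hi ≤ i → i < exp.length → t ≤ exp.getD i 0) →
    pvBisectGEAux exp t fuel lo hi ≤ exp.length ∧
    (∀ i, i < pvBisectGEAux exp t fuel lo hi → exp.getD i 0 < t) ∧
    (pvBisectGEAux exp t fuel lo hi < exp.length →
      t ≤ exp.getD (pvBisectGEAux exp t fuel lo hi) 0) := by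
  have hmono : ∀ i j, i ≤ j → j < exp.length → exp.getD i 0 ≤ exp.getD j 0 := by
    intro i j hij hj
    rw [List.getD_eq_getElem _ _ (by omega), List.getD_eq_getElem _ _ hj]
    rcases Nat.lt_or_ge i j with h | h
    · exact List.pairwise_iff_getElem.mp hsort i j (by omega) hj h
    · have : i = j := by omega
      subst this; rfl
  intro fuel
  induction fuel with
  | zero =>
    intro lo hi hn hle hhi hlow hhigh
    have : lo = hi := by omega
    subst this
    exact ⟨hhi, hlow, fun hlt => hhigh lo (le_refl lo) hlt⟩
  | succ fuel ih =>
    intro lo hi hn hle hhi hlow hhigh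
    rw [pvBisectGEAux]
    by_cases h : lo < hi
    · rw [if_pos h]
      by_cases hm : exp.getD ((lo + hi) / 2) 0 < t
      · rw [if_pos hm]
        exact ih _ hi (by omega) (by omega) hhi
          (fun i hilt => lt_of_le_of_lt (hmono i ((lo + hi) / 2) (by omega) (by omega)) hm)
          hhigh
      · rw [if_neg hm]
        refine ih lo ((lo + hi) / 2) (by omega) (by omega) (by omega) hlow ?_
        intro i hgei hilt
        exact le_trans (not_lt.mp hm) (hmono _ i hgei hilt)
    · rw [if_neg h]
      have : lo = hi := by omega
      subst this
      exact ⟨hhi, hlow, fun hlt => hhigh lo (le_refl lo) hlt⟩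

theorem pvBisectGE_spec (exp : List Int) (t : Int)
    (hsort : exp.Pairwise (· ≤ ·)) :
    pvBisectGE exp t 0 exp.length ≤ exp.length ∧
    (∀ i, i < pvBisectGE exp t 0 exp.length → exp.getD i 0 < t) ∧
    (pvBisectGE exp t 0 exp.length < exp.length →
      t ≤ exp.getD (pvBisectGE exp t 0 exp.length) 0) :=
  pvBisectGEAux_spec exp t hsort (exp.length - 0) 0 exp.length (le_refl _)
    (Nat.zero_le _) (le_refl _) (fun i hi => absurd hi (Nat.not_lt_zero i))
    (fun i hge hlt => absurd hge (by omega))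

-- the sorted distinct expected pages (proof-side abbreviation)
def pvSortedExp (ep : List Int) : List Int :=
  PySem.List.sorted (PySem.Set.ofList ep) (fun x => x) false

-- per-range: B's binary-search test on the sorted distinct expected pages equals
-- "some expected page lies in [p1, p2]".
theorem bisect_hit_iff (ep : List Int) (p1 p2 : Int) :
    (decide (pvBisectGE (pvSortedExp ep) p1 0 (pvSortedExp ep).length < (pvSortedExp ep).length) &&
     decide ((pvSortedExp ep).getD (pvBisectGE (pvSortedExp ep) p1 0 (pvSortedExp ep).length) 0 ≤ p2))
      = ep.any (fun p => decide (p1 ≤ p ∧ p ≤ p2)) := by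
  set exp := pvSortedExp ep with hexp
  have hsortlt : exp.Pairwise (· < ·) := PySem.List.sorted_ofList_pairwise_lt ep
  have hsort : exp.Pairwise (· ≤ ·) := hsortlt.imp (fun h => le_of_lt h)
  have hmem : ∀ p : Int, p ∈ exp ↔ p ∈ ep := by
    intro p
    rw [hexp, pvSortedExp, PySem.List.mem_sorted, PySem.Set.mem_ofList]
  obtain ⟨hr1, hr2, hr3⟩ := pvBisectGE_spec exp p1 hsort
  set lo := pvBisectGE exp p1 0 exp.length with hlo
  rw [Bool.eq_iff_iff]
  simp only [Bool.and_eq_true, decide_eq_true_eq, List.any_eq_true]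
  constructor
  · rintro ⟨hlt, hle⟩
    refine ⟨exp.getD lo 0, ?_, hr3 hlt, hle⟩
    rw [← hmem, List.getD_eq_getElem _ _ hlt]
    exact List.getElem_mem hlt
  · rintro ⟨p, hp, hp1, hp2⟩
    have hpe : p ∈ exp := (hmem p).mpr hp
    obtain ⟨j, hj, hpj⟩ := List.getElem_of_mem hpe
    have hjD : exp.getD j 0 = p := by rw [List.getD_eq_getElem _ _ hj, hpj]
    have hloj : lo ≤ j := by
      by_contra hc
      have := hr2 j (by omega)
      rw [hjD] at this; omega
    have hltn : lo < exp.length := by omega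
    refine ⟨hltn, ?_⟩
    have : exp.getD lo 0 ≤ exp.getD j 0 := by
      rw [List.getD_eq_getElem _ _ hltn, List.getD_eq_getElem _ _ hj]
      rcases Nat.lt_or_ge lo j with h | h
      · exact le_of_lt (List.pairwise_iff_getElem.mp hsortlt lo j hltn hj h)
      · have : lo = j := by omega
        subst this; rfl
    rw [hjD] at this; omega

-- A's inner per-range scan equals the same "some expected page in [p1, p2]" test.
theorem range_scan_iff (p1 p2 : Int) (ep : List Int) :
    (PySem.List.pyRange p1 (p2 + 1) 1).any (fun p => PySem.Set.contains (PySem.Set.ofList ep) p)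
      = ep.any (fun p => decide (p1 ≤ p ∧ p ≤ p2)) := by
  rw [Bool.eq_iff_iff]
  simp only [List.any_eq_true, PySem.Set.contains_iff, PySem.Set.mem_ofList,
    PySem.List.mem_pyRange_one, decide_eq_true_eq]
  constructor
  · rintro ⟨p, ⟨h1, h2⟩, hp⟩; exact ⟨p, hp, h1, by omega⟩
  · rintro ⟨p, hp, h1, h2⟩; exact ⟨p, ⟨h1, by omega⟩, hp⟩

-- B's early-return loop computes List.any of its per-range test.
theorem pvHitLoop_eq_any (exp : List Int) (rp : List (String × Int × Int)) :
    pvHitLoop exp rp = rp.any (fun t =>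
      let lo := pvBisectGE exp t.2.1 0 exp.length
      (lo < exp.length && decide (exp.getD lo 0 ≤ t.2.2))) := by
  induction rp with
  | nil => rfl
  | cons t rest ih =>
    simp only [pvHitLoop, List.any_cons, ih]
    split
    next h => rw [h, Bool.true_or]
    next h =>
      rw [Bool.not_eq_true] at h
      rw [h, Bool.false_or]

-- ===== VERDICT (by name: the statement is the Claim_ definition above) =====
theorem pages_hit_expected_spec : Claim_equal_pages_hit_expected := by
  intro rp ep _
  unfold Spec_pages_hit_expected pages_hit_expected pages_hit_expected_alt
  by_cases h : ep = []
  · simp [h]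
  · rw [if_neg h, if_neg h]
    show some _ = some (pvHitLoop (pvSortedExp ep) rp)
    rw [pvHitLoop_eq_any]
    refine congrArg some (List.any_congr rfl fun t => ?_)
    exact (range_scan_iff t.2.1 t.2.2 ep).trans (bisect_hit_iff ep t.2.1 t.2.2).symm
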